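-- pv_equiv track=rewrite | github.com/JMaskiewicz/my-leetcode | solving_3.py | find_next_player
-- ===== SOURCE A (Python) =====
-- from bisect import bisect_right, bisect_left
--
-- def find_next_player(current_pos, direction, players, storage):
--     x, y = current_pos
--
--     # Determine the relevant dictionary based on direction
--     if direction in ["N", "S"]:
--         axis_dict = storage[0]
--         key, val = x, y
--         search_forward = direction == "N"
--     elif direction in ["E", "W"]:
--         axis_dict = storage[1]
--         key, val = y, x
--         search_forward = direction == "E"
--     elif direction in ["NE", "SW"]:
--         axis_dict = storage[2]
--         key, val = y - x, x
--         search_forward = direction == "NE"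
--     else:  # NW, SE
--         axis_dict = storage[3]
--         key, val = y + x, x
--         search_forward = direction == "NW"
--
--     if key not in axis_dict:
--         return None, None
--
--     positions = axis_dict[key]  # Sorted list of (coordinate, player_index)
--
--     # Use binary search to locate the next player
--     pos_list = [p[0] for p in positions]  # Extract sorted positions
--     index = bisect_right(pos_list, val) if search_forward else bisect_left(pos_list, val) - 1
--
--     # Ensure we are within bounds and the player is active
--     while 0 <= index < len(positions):
--         next_pos, next_player = positions[index]
--         if next_player in players:
--             return next_player, players[next_player]
--         index += 1 if search_forward else -1  # Move in the correct direction
--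
--     return None, None  # No valid player found
-- ===== SOURCE B (Python) =====
-- # Single linear selection pass instead of bisect: relies on the documented
-- # invariant that each per-key list is sorted by coordinate.
-- _AXIS = {"N": (0, True), "S": (0, False), "E": (1, True), "W": (1, False),
--          "NE": (2, True), "SW": (2, False), "NW": (3, True)}
--
--
-- def find_next_player(current_pos, direction, players, storage):
--     x, y = current_pos
--     slot, forward = _AXIS.get(direction, (3, False))
--     key, val = ((x, y), (y, x), (y - x, x), (y + x, x))[slot]
--
--     positions = storage[slot].get(key)
--     if positions is None:
--         return None, None
--
--     if forward:
--         # nearest active player above val = first one in the sorted list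
--         for c, p in positions:
--             if c > val and p in players:
--                 return p, players[p]
--         return None, None
--
--     # nearest active player below val = last matching one in the sorted list
--     best = None
--     for c, p in positions:
--         if c < val and p in players:
--             best = p
--     if best is None:
--         return None, None
--     return best, players[best]
-- ===== Notes on version B (the rewrite author's own statement) =====
-- stated objective: simpler
-- what changed: B drops the binary search entirely: instead of A's extracted-key list + bisect + bounds-checked index walk, it makes one linear selection pass over the per-key list, returning the first active entry with coordinate above val (forward) or remembering the last active entry with coordinate below val (backward), which is correct because the per-key lists are sorted by coordinate as the data structure documents; Pre_ excludes inputs whose selected per-key list violates that sortedness invariant, on which A's bisect result is accidental.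
import Mathlib
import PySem

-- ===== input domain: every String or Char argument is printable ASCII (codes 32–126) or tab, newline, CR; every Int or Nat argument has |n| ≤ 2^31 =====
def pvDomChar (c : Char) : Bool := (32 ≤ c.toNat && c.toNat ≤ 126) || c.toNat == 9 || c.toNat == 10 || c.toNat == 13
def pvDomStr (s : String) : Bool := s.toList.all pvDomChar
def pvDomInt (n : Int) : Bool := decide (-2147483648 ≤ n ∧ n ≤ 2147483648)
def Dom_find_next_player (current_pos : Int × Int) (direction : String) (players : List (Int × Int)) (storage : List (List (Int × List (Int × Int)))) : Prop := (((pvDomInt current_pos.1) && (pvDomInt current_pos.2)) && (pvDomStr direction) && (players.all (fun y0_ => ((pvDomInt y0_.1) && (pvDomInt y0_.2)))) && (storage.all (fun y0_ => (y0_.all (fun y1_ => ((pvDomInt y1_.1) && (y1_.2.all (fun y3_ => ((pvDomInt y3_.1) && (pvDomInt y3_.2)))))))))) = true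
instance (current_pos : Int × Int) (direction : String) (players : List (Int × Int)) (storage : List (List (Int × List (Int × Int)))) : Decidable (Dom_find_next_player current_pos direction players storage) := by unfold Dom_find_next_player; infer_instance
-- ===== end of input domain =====

-- B replaces A's bisect + directional index walk by a single linear selection pass over the
-- per-key list (first active entry above val / last active entry below val), which is correct
-- on the lists the data structure documents as sorted by coordinate (Pre_ states that).

-- ===== PORT A =====

-- A's while-loop over index (Int: bisect_left - 1 can be -1); fuel = positions.length + 1 never
-- runs out on the indices the loop reaches.
def scanA (positions players : List (Int × Int)) (fwd : Bool) : Nat → Int → Option Int × Option Int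
  | 0, _ => (none, none)
  | fuel + 1, idx =>
    if 0 ≤ idx ∧ idx < (positions.length : Int) then
      match PySem.List.pyGet? positions idx with
      | some np =>
        match (PySem.Dict.mk players).get? np.2 with
        | some v => (some np.2, some v)
        | none => scanA positions players fwd fuel (if fwd then idx + 1 else idx - 1)
      | none => (none, none)  -- unreachable: idx is in range
    else (none, none)

-- the body of A after the direction dispatch: dict lookup, key extraction, bisect, index walk
def searchA (players : List (Int × Int)) (axis : List (Int × List (Int × Int))) (key val : Int) (fwd : Bool) : Option Int × Option Int :=
  match (PySem.Dict.mk axis).get? key with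
  | none => (none, none)
  | some positions =>
    let pos_list := positions.map Prod.fst
    let index : Int :=
      if fwd then (PySem.List.bisectRight pos_list val : Int)
      else (PySem.List.bisectLeft pos_list val : Int) - 1
    scanA positions players fwd (positions.length + 1) index

def find_next_player (current_pos : Int × Int) (direction : String) (players : List (Int × Int)) (storage : List (List (Int × List (Int × Int)))) : Option Int × Option Int :=
  let x := current_pos.1
  let y := current_pos.2
  -- storage[i] is total here via getD: Pre_find_next_player guarantees the index is in range
  if direction = "N" ∨ direction = "S" then
    searchA players (storage.getD 0 []) x y (direction == "N")
  else if direction = "E" ∨ direction = "W" then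
    searchA players (storage.getD 1 []) y x (direction == "E")
  else if direction = "NE" ∨ direction = "SW" then
    searchA players (storage.getD 2 []) (y - x) x (direction == "NE")
  else
    searchA players (storage.getD 3 []) (y + x) x (direction == "NW")

-- ===== PORT B =====

-- B's forward loop: 'for c, p in positions: if c > val and p in players: return p, players[p]'
def fwdScan (players : List (Int × Int)) (val : Int) : List (Int × Int) → Option Int × Option Int
  | [] => (none, none)
  | cp :: rest =>
    if val < cp.1 then
      match (PySem.Dict.mk players).get? cp.2 with
      | some v => (some cp.2, some v)
      | none => fwdScan players val rest
    else fwdScan players val rest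

-- B's backward loop: 'best = p' for every active entry below val (last write wins)
def bwdBest (players : List (Int × Int)) (val : Int) (positions : List (Int × Int)) : Option Int :=
  positions.foldl
    (fun best cp => if cp.1 < val ∧ ((PySem.Dict.mk players).get? cp.2).isSome then some cp.2 else best)
    none

def searchAlt (players : List (Int × Int)) (axis : List (Int × List (Int × Int))) (key val : Int) (fwd : Bool) : Option Int × Option Int :=
  match (PySem.Dict.mk axis).get? key with
  | none => (none, none)
  | some positions =>
    if fwd then fwdScan players val positions
    else
      match bwdBest players val positions with
      | none => (none, none)
      -- players[best]: best was stored only when active, so get? is some there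
      | some b => (some b, (PySem.Dict.mk players).get? b)

def find_next_player_alt (current_pos : Int × Int) (direction : String) (players : List (Int × Int)) (storage : List (List (Int × List (Int × Int)))) : Option Int × Option Int :=
  let x := current_pos.1
  let y := current_pos.2
  -- _AXIS.get(direction, (3, False)): lookup in the literal 7-key table
  let p : Nat × Bool :=
    if direction = "N" then (0, true)
    else if direction = "S" then (0, false)
    else if direction = "E" then (1, true)
    else if direction = "W" then (1, false)
    else if direction = "NE" then (2, true)
    else if direction = "SW" then (2, false)
    else if direction = "NW" then (3, true)
    else (3, false)
  let kv : Int × Int :=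
    match p.1 with
    | 0 => (x, y)
    | 1 => (y, x)
    | 2 => (y - x, x)
    | _ => (y + x, x)
  -- storage[slot] is total here via getD: Pre_find_next_player guarantees the index is in range
  searchAlt players (storage.getD p.1 []) kv.1 kv.2 p.2

-- ===== PRECONDITION & SPEC =====
-- A raises IndexError iff the storage slot selected by the direction does not exist; beyond
-- that, Pre_ excludes inputs whose SELECTED per-key positions list is not sorted by coordinate:
-- they violate the data structure's documented invariant ('Sorted list of (coordinate,
-- player_index)') and A's bisect result on them is accidental.
def Pre_find_next_player (current_pos : Int × Int) (direction : String) (players : List (Int × Int)) (storage : List (List (Int × List (Int × Int)))) : Prop :=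
  let slot : Nat :=
    if direction = "N" ∨ direction = "S" then 0
    else if direction = "E" ∨ direction = "W" then 1
    else if direction = "NE" ∨ direction = "SW" then 2
    else 3
  let key : Int :=
    if slot = 0 then current_pos.1
    else if slot = 1 then current_pos.2
    else if slot = 2 then current_pos.2 - current_pos.1
    else current_pos.2 + current_pos.1
  slot < storage.length ∧
  List.Pairwise (· ≤ ·) (((((PySem.Dict.mk (storage.getD slot [])).get? key).getD []).map Prod.fst))
instance (current_pos : Int × Int) (direction : String) (players : List (Int × Int)) (storage : List (List (Int × List (Int × Int)))) : Decidable (Pre_find_next_player current_pos direction players storage) := by unfold Pre_find_next_player; infer_instance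

def pvWitness_find_next_player : (Int × Int) × String × (List (Int × Int)) × (List (List (Int × List (Int × Int)))) :=
  ((1, 2), "N", [(7, 3)], [[(1, [(0, 5), (4, 7)])], [], [], []])

def Spec_find_next_player (current_pos : Int × Int) (direction : String) (players : List (Int × Int)) (storage : List (List (Int × List (Int × Int)))) (out : Option Int × Option Int) : Prop := out = find_next_player_alt current_pos direction players storage
instance (current_pos : Int × Int) (direction : String) (players : List (Int × Int)) (storage : List (List (Int × List (Int × Int)))) (out : Option Int × Option Int) : Decidable (Spec_find_next_player current_pos direction players storage out) := by unfold Spec_find_next_player; infer_instance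

-- ===== CLAIM (what is proved, stated in full; the proofs are below) =====
def Claim_equal_find_next_player : Prop := ∀ (current_pos : Int × Int) (direction : String) (players : List (Int × Int)) (storage : List (List (Int × List (Int × Int)))), Dom_find_next_player current_pos direction players storage → Pre_find_next_player current_pos direction players storage → Spec_find_next_player current_pos direction players storage (find_next_player current_pos direction players storage)

-- ===== LEMMAS AND PROOFS =====

-- first-match scan: what A's index walk amounts to on the candidate segment
def scanFirst (players : List (Int × Int)) : List (Int × Int) → Option Int × Option Int
  | [] => (none, none)
  | q :: rest =>
    match (PySem.Dict.mk players).get? q.2 with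
    | some v => (some q.2, some v)
    | none => scanFirst players rest

-- forward walk from index n = first-match scan over the suffix from n
lemma scanA_fwd (positions players : List (Int × Int)) :
    ∀ fuel n, positions.length - n < fuel →
      scanA positions players true fuel (n : Int) = scanFirst players (positions.drop n) := by
  intro fuel
  induction fuel with
  | zero => intro n h; omega
  | succ f ih =>
    intro n h
    by_cases hn : n < positions.length
    · have hcond : (0 : Int) ≤ (n : Int) ∧ (n : Int) < (positions.length : Int) := by
        constructor <;> [positivity; exact_mod_cast hn]
      rw [List.drop_eq_getElem_cons hn]
      simp only [scanA, if_pos hcond, PySem.List.pyGet?_natCast, List.getElem?_eq_getElem hn, scanFirst]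
      cases hv : (PySem.Dict.mk players).get? positions[n].2 with
      | some v => rfl
      | none =>
        have hstep : ((n : Int) + 1) = ((n + 1 : Nat) : Int) := by push_cast; ring
        simp only [reduceIte, hstep]
        exact ih (n + 1) (by omega)
    · have hcond : ¬ ((0 : Int) ≤ (n : Int) ∧ (n : Int) < (positions.length : Int)) := by
        rintro ⟨-, hlt⟩
        exact hn (by exact_mod_cast hlt)
      rw [List.drop_eq_nil_of_le (by omega), scanA.eq_2, if_neg hcond]
      rfl

-- backward walk from index b - 1 = first-match scan over the reversed prefix of length b
lemma scanA_bwd (positions players : List (Int × Int)) :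
    ∀ b fuel, b < fuel → b ≤ positions.length →
      scanA positions players false fuel ((b : Int) - 1) = scanFirst players ((positions.take b).reverse) := by
  intro b
  induction b with
  | zero =>
    intro fuel hf _
    obtain ⟨f, rfl⟩ : ∃ f, fuel = f + 1 := ⟨fuel - 1, by omega⟩
    have hcond : ¬ ((0 : Int) ≤ ((0 : Nat) : Int) - 1 ∧ ((0 : Nat) : Int) - 1 < (positions.length : Int)) := by
      rintro ⟨h0, -⟩; omega
    simp only [scanA, scanFirst, List.take_zero, List.reverse_nil]
    rw [if_neg hcond]
  | succ b ih =>
    intro fuel hf hb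
    obtain ⟨f, rfl⟩ : ∃ f, fuel = f + 1 := ⟨fuel - 1, by omega⟩
    have hbl : b < positions.length := by omega
    have hidx : ((b + 1 : Nat) : Int) - 1 = ((b : Nat) : Int) := by push_cast; ring
    have hcond : (0 : Int) ≤ (b : Int) ∧ (b : Int) < (positions.length : Int) := by
      constructor <;> [positivity; exact_mod_cast hbl]
    have htake : positions.take (b + 1) = positions.take b ++ [positions[b]] := by
      rw [List.take_add_one, List.getElem?_eq_getElem hbl]; rfl
    rw [hidx, htake, List.reverse_append]
    simp only [scanA, if_pos hcond, PySem.List.pyGet?_natCast, List.getElem?_eq_getElem hbl,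
      List.reverse_cons, List.reverse_nil, List.nil_append, List.singleton_append, scanFirst]
    cases hv : (PySem.Dict.mk players).get? positions[b].2 with
    | some v => rfl
    | none =>
      simp only [Bool.false_eq_true, reduceIte]
      exact ih f (by omega) (by omega)

-- B's forward pass skips a low prefix and agrees with the first-match scan on a high suffix
lemma fwdScan_split (players : List (Int × Int)) (val : Int) :
    ∀ l1 l2 : List (Int × Int), (∀ e ∈ l1, e.1 ≤ val) → (∀ e ∈ l2, val < e.1) →
      fwdScan players val (l1 ++ l2) = scanFirst players l2 := by
  intro l1
  induction l1 with
  | nil =>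
    intro l2 _ h2
    induction l2 with
    | nil => rfl
    | cons e rest ih =>
      simp only [List.nil_append, fwdScan, scanFirst,
        if_pos (h2 e (List.mem_cons_self))]
      cases hv : (PySem.Dict.mk players).get? e.2 with
      | some v => rfl
      | none => simpa using ih (fun x hx => h2 x (List.mem_cons_of_mem _ hx))
  | cons e rest ih =>
    intro l2 h1 h2
    have he : ¬ val < e.1 := not_lt.mpr (h1 e List.mem_cons_self)
    simp only [List.cons_append, fwdScan, if_neg he]
    exact ih l2 (fun x hx => h1 x (List.mem_cons_of_mem _ hx)) h2

-- entries at or above val never update B's backward accumulator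
lemma bwdFold_skip (players : List (Int × Int)) (val : Int) :
    ∀ l2 : List (Int × Int), (∀ e ∈ l2, val ≤ e.1) → ∀ acc,
      l2.foldl (fun best cp => if cp.1 < val ∧ ((PySem.Dict.mk players).get? cp.2).isSome then some cp.2 else best) acc = acc := by
  intro l2
  induction l2 with
  | nil => intro _ _; rfl
  | cons e rest ih =>
    intro h acc
    have he : ¬ (e.1 < val ∧ ((PySem.Dict.mk players).get? e.2).isSome) := by
      rintro ⟨hlt, -⟩; exact absurd (h e List.mem_cons_self) (not_le.mpr hlt)
    simp only [List.foldl_cons, if_neg he]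
    exact ih (fun x hx => h x (List.mem_cons_of_mem _ hx)) acc

-- on an all-below-val list, B's last-write fold + final lookup = first-match over the reverse
lemma bwd_rev (players : List (Int × Int)) (val : Int) :
    ∀ l : List (Int × Int), (∀ e ∈ l, e.1 < val) →
      (match l.foldl (fun best cp => if cp.1 < val ∧ ((PySem.Dict.mk players).get? cp.2).isSome then some cp.2 else best) none with
       | none => ((none : Option Int), (none : Option Int))
       | some b => (some b, (PySem.Dict.mk players).get? b)) = scanFirst players l.reverse := by
  intro l
  induction l using List.reverseRecOn with
  | nil => exact fun _ => rfl
  | append_singleton l e ih =>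
    intro h
    have he : e.1 < val := h e (by simp)
    rw [List.foldl_append, List.reverse_append]
    simp only [List.foldl_cons, List.foldl_nil, List.reverse_cons, List.reverse_nil,
      List.nil_append, List.singleton_append, scanFirst]
    cases hv : (PySem.Dict.mk players).get? e.2 with
    | some v => simp [he, hv]
    | none =>
      simp only [Option.isSome_none, Bool.false_eq_true, and_false, if_false]
      exact ih (fun x hx => h x (by simp [hx]))

-- the post-dispatch halves agree whenever the looked-up list is sorted by coordinate
lemma search_eq_sorted (players : List (Int × Int)) (axis : List (Int × List (Int × Int))) (key val : Int) (fwd : Bool)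
    (hs : List.Pairwise (· ≤ ·) ((((PySem.Dict.mk axis).get? key).getD []).map Prod.fst)) :
    searchA players axis key val fwd = searchAlt players axis key val fwd := by
  unfold searchA searchAlt
  cases hget : (PySem.Dict.mk axis).get? key with
  | none => rfl
  | some positions =>
    rw [hget] at hs
    simp only [Option.getD_some] at hs
    simp only []
    have hlen : (positions.map Prod.fst).length = positions.length := List.length_map ..
    cases fwd with
    | true =>
      obtain ⟨hle, hlo, hhi⟩ := PySem.List.bisectRight_spec (positions.map Prod.fst) val hs
      set bp := PySem.List.bisectRight (positions.map Prod.fst) val with hbp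
      rw [hlen] at hle
      simp only [reduceIte]
      rw [scanA_fwd positions players (positions.length + 1) bp (by omega)]
      have h1 : ∀ e ∈ positions.take bp, e.1 ≤ val := by
        intro e he
        obtain ⟨i, hi, hei⟩ := List.getElem_of_mem he
        have hib : i < bp := by
          have := hi; simp only [List.length_take] at this; omega
        have hip : i < positions.length := by
          have := hi; simp only [List.length_take] at this; omega
        have hx := hlo i (by simpa [hlen] using hip) hib
        rw [List.getElem_map] at hx
        rw [← hei, List.getElem_take]
        exact hx
      have h2 : ∀ e ∈ positions.drop bp, val < e.1 := by
        intro e he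
        obtain ⟨i, hi, hei⟩ := List.getElem_of_mem he
        have hip : bp + i < positions.length := by
          have := hi; simp only [List.length_drop] at this; omega
        have hx := hhi (bp + i) (by simpa [hlen] using hip) (by omega)
        rw [List.getElem_map] at hx
        rw [← hei, List.getElem_drop]
        exact hx
      symm
      calc fwdScan players val positions
          = fwdScan players val (positions.take bp ++ positions.drop bp) := by
            rw [List.take_append_drop]
        _ = scanFirst players (positions.drop bp) := fwdScan_split players val _ _ h1 h2
    | false =>
      obtain ⟨hle, hlo, hhi⟩ := PySem.List.bisectLeft_spec (positions.map Prod.fst) val hs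
      set bl := PySem.List.bisectLeft (positions.map Prod.fst) val with hbl
      rw [hlen] at hle
      simp only [Bool.false_eq_true, reduceIte]
      rw [scanA_bwd positions players bl (positions.length + 1) (by omega) hle]
      have h1 : ∀ e ∈ positions.take bl, e.1 < val := by
        intro e he
        obtain ⟨i, hi, hei⟩ := List.getElem_of_mem he
        have hib : i < bl := by
          have := hi; simp only [List.length_take] at this; omega
        have hip : i < positions.length := by
          have := hi; simp only [List.length_take] at this; omega
        have hx := hlo i (by simpa [hlen] using hip) hib
        rw [List.getElem_map] at hx
        rw [← hei, List.getElem_take]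
        exact hx
      have h2 : ∀ e ∈ positions.drop bl, val ≤ e.1 := by
        intro e he
        obtain ⟨i, hi, hei⟩ := List.getElem_of_mem he
        have hip : bl + i < positions.length := by
          have := hi; simp only [List.length_drop] at this; omega
        have hx := hhi (bl + i) (by simpa [hlen] using hip) (by omega)
        rw [List.getElem_map] at hx
        rw [← hei, List.getElem_drop]
        exact hx
      unfold bwdBest
      symm
      calc (match positions.foldl
              (fun best cp => if cp.1 < val ∧ ((PySem.Dict.mk players).get? cp.2).isSome then some cp.2 else best)
              none with
            | none => ((none : Option Int), (none : Option Int))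
            | some b => (some b, (PySem.Dict.mk players).get? b))
          = (match (positions.take bl).foldl
              (fun best cp => if cp.1 < val ∧ ((PySem.Dict.mk players).get? cp.2).isSome then some cp.2 else best)
              none with
            | none => ((none : Option Int), (none : Option Int))
            | some b => (some b, (PySem.Dict.mk players).get? b)) := by
            conv_lhs => rw [← List.take_append_drop bl positions]
            rw [List.foldl_append, bwdFold_skip players val _ h2]
        _ = scanFirst players ((positions.take bl).reverse) := bwd_rev players val _ h1

-- ===== VERDICT (by name: the statement is the Claim_ definition above) =====
theorem find_next_player_spec : Claim_equal_find_next_player := by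
  intro current_pos direction players storage _ hpre
  unfold Pre_find_next_player at hpre
  unfold Spec_find_next_player find_next_player find_next_player_alt
  by_cases h1 : direction = "N"
  · subst h1; simp only [] at hpre ⊢
    simp at hpre ⊢
    exact search_eq_sorted players (storage.getD 0 []) current_pos.1 current_pos.2 true hpre.2
  · by_cases h2 : direction = "S"
    · subst h2; simp at hpre ⊢
      exact search_eq_sorted players (storage.getD 0 []) current_pos.1 current_pos.2 false hpre.2
    · by_cases h3 : direction = "E"
      · subst h3; simp at hpre ⊢
        exact search_eq_sorted players (storage.getD 1 []) current_pos.2 current_pos.1 true hpre.2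
      · by_cases h4 : direction = "W"
        · subst h4; simp at hpre ⊢
          exact search_eq_sorted players (storage.getD 1 []) current_pos.2 current_pos.1 false hpre.2
        · by_cases h5 : direction = "NE"
          · subst h5; simp at hpre ⊢
            exact search_eq_sorted players (storage.getD 2 []) (current_pos.2 - current_pos.1) current_pos.1 true hpre.2
          · by_cases h6 : direction = "SW"
            · subst h6; simp at hpre ⊢
              exact search_eq_sorted players (storage.getD 2 []) (current_pos.2 - current_pos.1) current_pos.1 false hpre.2
            · by_cases h7 : direction = "NW"
              · subst h7; simp at hpre ⊢
                exact search_eq_sorted players (storage.getD 3 []) (current_pos.2 + current_pos.1) current_pos.1 true hpre.2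
              · have hb : (direction == "NW") = false := by simp [h7]
                simp only [h1, h2, h3, h4, h5, h6, h7, or_self, if_false] at hpre ⊢
                norm_num at hpre
                rw [hb]
                exact search_eq_sorted players (storage.getD 3 []) (current_pos.2 + current_pos.1) current_pos.1 false hpre.2
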